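-- pv_equiv track=rewrite | github.com/sky-butterfly/coding-test | 프로그래머스/Level_1/덧칠하기.py | solution
-- ===== SOURCE A (Python) =====
-- def solution(n, m, section):
--     answer = 0
--     arr = []
--
--     start = section[0]
--     end = section[len(section)-1]
--
--     while len(section) > 0:
--         s = section[0]
--         if s+(m-1) > n:
--             answer += 1
--             break
--
--         for k in range(m):
--             ss = section[0]
--             if ss >= s+m:
--                 break
--             section.pop(0)
--             if len(section) < 1:
--                 break
--
--         answer += 1
--
--     return answer
-- ===== SOURCE B (Python) =====
-- def solution(n, m, section):
--     # One-pass greedy over the sections: track the current stroke's coverage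
--     # limit (exclusive) and how many more sections this stroke may absorb,
--     # instead of repeatedly popping from the front of the list.
--     # NOTE: unlike A, this does not mutate `section`; equivalence is about the
--     # return value only.
--     ans = 0
--     limit = 0
--     cap = 0
--     for s in section:
--         if cap > 0 and s < limit:
--             cap -= 1
--             continue
--         if s + m - 1 > n:
--             return ans + 1
--         ans += 1
--         limit = s + m
--         cap = m - 1
--     return ans
-- ===== Notes on version B (the rewrite author's own statement) =====
-- stated objective: faster
-- what changed: Replaces the nested while/for loop that repeatedly pops from the front of the list with a single left-to-right pass keeping (strokes, coverage limit, remaining absorb capacity), so no list mutation or front pops remain; Pre_ excludes the empty list (A raises IndexError) and m <= 0 (A diverges except when the first section already triggers the out-of-range break).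
-- outside the precondition, e.g. on solution(5, 3, []): A raises IndexError, B returns 0; on solution(0, 0, [5]): A returns 1, B returns 1; on solution(10, 0, [5, 6]): A does not finish within the time limit, B returns 2
import Mathlib
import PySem

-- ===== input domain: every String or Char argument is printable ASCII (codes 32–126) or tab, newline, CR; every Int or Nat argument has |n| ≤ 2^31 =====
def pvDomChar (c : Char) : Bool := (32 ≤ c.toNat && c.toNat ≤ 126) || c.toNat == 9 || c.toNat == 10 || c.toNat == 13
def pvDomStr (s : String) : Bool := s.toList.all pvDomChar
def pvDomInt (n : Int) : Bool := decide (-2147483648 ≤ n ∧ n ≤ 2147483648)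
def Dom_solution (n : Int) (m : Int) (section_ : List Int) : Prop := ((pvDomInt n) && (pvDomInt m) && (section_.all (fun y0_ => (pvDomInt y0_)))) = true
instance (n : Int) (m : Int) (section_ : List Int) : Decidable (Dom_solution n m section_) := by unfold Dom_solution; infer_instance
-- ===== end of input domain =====

-- B replaces A's nested front-popping loops by one left-to-right pass with a
-- (strokes, coverage-limit, capacity) state; A mutates `section` in place (pops
-- it empty), B does not — the equivalence proved here is about the return value.


-- ===== PORT A =====
-- Inner `for k in range(m)` loop: pops leading elements `< bound` (bound = s+m),
-- at most `k` of them, stopping early when the list becomes empty.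
def innerA (k : Nat) (bound : Int) (sec : List Int) : List Int :=
  match k, sec with
  | 0, sec => sec                                   -- range exhausted
  | _ + 1, [] => []                                 -- (unreachable under A's outer guard)
  | k + 1, ss :: rest =>
      if ss ≥ bound then ss :: rest                 -- if ss >= s+m: break
      else if rest = [] then rest                   -- pop; if len(section) < 1: break
      else innerA k bound rest

-- Outer `while len(section) > 0` loop; each iteration pops ≥ 1 element when
-- 1 ≤ m, so fuel = initial length suffices there (fuel, not Pre_, makes it total).
def outerA (n m : Int) (fuel : Nat) (answer : Int) (sec : List Int) : Int :=
  match fuel, sec with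
  | _, [] => answer
  | 0, _ => answer
  | fuel + 1, s :: rest =>
      if s + (m - 1) > n then answer + 1
      else outerA n m fuel (answer + 1) (innerA m.toNat (s + m) (s :: rest))

def solution (n : Int) (m : Int) (section_ : List Int) : Int :=
  -- `answer = 0; arr = []; start = section[0]; end = section[len(section)-1]`:
  -- arr/start/end are dead in A; start/end raise IndexError iff section_ = [] (excluded by Pre_).
  outerA n m section_.length 0 section_

-- ===== PORT B =====
-- Single pass: `for s in section` with early return, state (ans, limit, cap).
def goB (n m : Int) (sec : List Int) (ans limit cap : Int) : Int :=
  match sec with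
  | [] => ans
  | s :: rest =>
      if cap > 0 ∧ s < limit then goB n m rest ans limit (cap - 1)
      else if s + m - 1 > n then ans + 1
      else goB n m rest (ans + 1) (s + m) (m - 1)

def solution_alt (n : Int) (m : Int) (section_ : List Int) : Int :=
  goB n m section_ 0 0 0

-- ===== PRECONDITION & SPEC =====
-- Pre_ excludes the empty list, on which A raises IndexError (section[0]), and
-- m ≤ 0, on which A's loop never shrinks the list and diverges except when the
-- first section already triggers the out-of-range break.
def Pre_solution (n : Int) (m : Int) (section_ : List Int) : Prop :=
  section_ ≠ [] ∧ 1 ≤ m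
instance (n : Int) (m : Int) (section_ : List Int) : Decidable (Pre_solution n m section_) := by
  unfold Pre_solution; infer_instance

def pvWitness_solution : Int × Int × List Int := (8, 4, [2, 4, 6])

def Spec_solution (n : Int) (m : Int) (section_ : List Int) (out : Int) : Prop :=
  out = solution_alt n m section_
instance (n : Int) (m : Int) (section_ : List Int) (out : Int) : Decidable (Spec_solution n m section_ out) := by
  unfold Spec_solution; infer_instance

-- ===== CLAIM (what is proved, stated in full; the proofs are below) =====
def Claim_equal_solution : Prop := ∀ (n : Int) (m : Int) (section_ : List Int), Dom_solution n m section_ → Pre_solution n m section_ → Spec_solution n m section_ (solution n m section_)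

-- ===== LEMMAS AND PROOFS =====

theorem innerA_length_le (k : Nat) (bound : Int) (sec : List Int) :
    (innerA k bound sec).length ≤ sec.length := by
  induction k generalizing sec with
  | zero => simp [innerA]
  | succ k ih =>
    cases sec with
    | nil => simp [innerA]
    | cons ss rest =>
      simp only [innerA]
      split_ifs with h1 h2
      · simp
      · simp [h2]
      · exact le_trans (ih rest) (by simp)

-- B's skipping phase with capacity k consumes exactly what A's inner loop pops.
theorem goB_skip (n m : Int) (k : Nat) (sec : List Int) (ans limit : Int) :
    goB n m sec ans limit (k : Int) = goB n m (innerA k limit sec) ans limit 0 := by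
  induction k generalizing sec with
  | zero => simp [innerA]
  | succ k ih =>
    cases sec with
    | nil => simp [innerA, goB]
    | cons ss rest =>
      by_cases hlt : ss < limit
      · have hcap : ((k + 1 : Nat) : Int) > 0 := by positivity
        have hcast : ((k + 1 : Nat) : Int) - 1 = (k : Int) := by push_cast; ring
        rw [show (innerA (k + 1) limit (ss :: rest)) =
              if rest = [] then rest else innerA k limit rest by
            simp [innerA, not_le.mpr hlt]]
        by_cases hrest : rest = []
        · subst hrest
          simp [goB, hlt]
        · simp only [goB, hcap, hlt, and_self, if_true, hcast, if_neg hrest]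
          exact ih rest
      · have hge : ss ≥ limit := not_lt.mp hlt
        rw [show (innerA (k + 1) limit (ss :: rest)) = ss :: rest by
            simp [innerA, hge]]
        simp [goB, hlt]

-- Main loop correspondence: at a stroke boundary (cap = 0) the one-pass fold
-- agrees with A's pop loop, for any leftover limit.
theorem outerA_eq_goB (n m : Int) (hm : 1 ≤ m) (fuel : Nat) (sec : List Int)
    (ans limit : Int) (hlen : sec.length ≤ fuel) :
    outerA n m fuel ans sec = goB n m sec ans limit 0 := by
  induction fuel generalizing sec ans limit with
  | zero =>
    have : sec = [] := List.eq_nil_of_length_eq_zero (Nat.le_zero.mp hlen)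
    subst this; simp [outerA, goB]
  | succ fuel ih =>
    cases sec with
    | nil => simp [outerA, goB]
    | cons s rest =>
      by_cases hbig : s + (m - 1) > n
      · have hbig' : s + m - 1 > n := by omega
        simp [outerA, goB, hbig, hbig']
      · have hbig' : ¬ s + m - 1 > n := by omega
        simp only [outerA, goB, if_neg hbig, if_neg hbig', if_neg (by omega : ¬ ((0:Int) > 0 ∧ s < limit))]
        -- A's inner loop pops s (since s < s+m) and then up to m-1 more.
        have hk : m.toNat = (m.toNat - 1) + 1 := by omega
        have hstep : innerA m.toNat (s + m) (s :: rest) =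
            if rest = [] then rest else innerA (m.toNat - 1) (s + m) rest := by
          rw [hk]; simp [innerA, not_le.mpr (by omega : s < s + m)]
        have hcast : ((m.toNat - 1 : Nat) : Int) = m - 1 := by omega
        by_cases hrest : rest = []
        · subst hrest
          simp [hstep, outerA, goB]
        · rw [hstep, if_neg hrest]
          have hlen' : (innerA (m.toNat - 1) (s + m) rest).length ≤ fuel :=
            le_trans (innerA_length_le _ _ _) (by simpa using Nat.lt_succ_iff.mp hlen)
          rw [ih _ (ans + 1) (s + m) hlen', ← hcast, goB_skip]

-- ===== VERDICT (by name: the statement is the Claim_ definition above) =====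
theorem solution_spec : Claim_equal_solution := by
  intro n m section_ _ hpre
  unfold Spec_solution solution solution_alt
  exact outerA_eq_goB n m hpre.2 section_.length section_ 0 0 le_rfl
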